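-- pv_equiv track=rewrite | github.com/azyr/azpoker | pokerstars_parser.py | calc_minv
-- ===== SOURCE A (Python) =====
-- import copy
--
-- def calc_minv(actions, baseline=None, ante=0):
--     assert ante >= 0
--     names,_,_,_,_ = zip(*actions)
--     ante = 0
--     if baseline:
--         minv = copy.deepcopy(baseline)
--         if ante > 0:
--             for name in minv:
--                 minv[name] -= ante
--     else:
--         minv = {x: 0 for x in names}
--     #prevsize = max(minv.values()) - min(minv.values())  # big blind - ante
--     for t in actions:
--         name = t[0]
--         action = t[1]
--         amt = t[2]
--         himark = t[4]
--         if amt: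
--             if action == 'raise':
--                 minv[name] += amt - himark - minv[name] - ante
--             elif action == 'bet':
--                 minv[name] += amt
--             elif action == 'call':
--                 minv[name] += amt
--             else:
--                 raise Exception("Unexpected investment action: {}".format(action))
--     return minv
-- ===== SOURCE B (Python) =====
-- def calc_minv(actions, baseline=None, ante=0):
--     # Index-first design: register every player and group their effective
--     # (action, amt, himark) rows in one pass, then compute each player's
--     # value independently from its own row list.
--     assert ante >= 0
--     groups = {}
--     for name, action, amt, _, himark in actions:
--         groups.setdefault(name, [])
--         if amt:
--             groups[name].append((action, amt, himark))
--     if baseline: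
--         items = list(baseline.items())
--     else:
--         items = [(name, 0) for name in groups]
--     minv = {}
--     for name, start in items:
--         v = start
--         for action, amt, himark in groups.get(name, []):
--             if action == 'raise':
--                 v = amt - himark
--             elif action == 'bet' or action == 'call':
--                 v = v + amt
--             else:
--                 raise Exception("Unexpected investment action: {}".format(action))
--         minv[name] = v
--     return minv
-- ===== Notes on version B (the rewrite author's own statement) =====
-- stated objective: alternative
-- what changed: Replaces A's single interleaved scan that mutates the live result dict with an index-first design: one pass groups each player's effective (action, amt, himark) rows, then each player's final value is computed independently from its own row list; Pre_ excludes exactly the inputs where A raises (empty actions, negative ante, an unknown action with truthy amount, or a truthy-amount row for a player missing from a non-empty baseline).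
import Mathlib
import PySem

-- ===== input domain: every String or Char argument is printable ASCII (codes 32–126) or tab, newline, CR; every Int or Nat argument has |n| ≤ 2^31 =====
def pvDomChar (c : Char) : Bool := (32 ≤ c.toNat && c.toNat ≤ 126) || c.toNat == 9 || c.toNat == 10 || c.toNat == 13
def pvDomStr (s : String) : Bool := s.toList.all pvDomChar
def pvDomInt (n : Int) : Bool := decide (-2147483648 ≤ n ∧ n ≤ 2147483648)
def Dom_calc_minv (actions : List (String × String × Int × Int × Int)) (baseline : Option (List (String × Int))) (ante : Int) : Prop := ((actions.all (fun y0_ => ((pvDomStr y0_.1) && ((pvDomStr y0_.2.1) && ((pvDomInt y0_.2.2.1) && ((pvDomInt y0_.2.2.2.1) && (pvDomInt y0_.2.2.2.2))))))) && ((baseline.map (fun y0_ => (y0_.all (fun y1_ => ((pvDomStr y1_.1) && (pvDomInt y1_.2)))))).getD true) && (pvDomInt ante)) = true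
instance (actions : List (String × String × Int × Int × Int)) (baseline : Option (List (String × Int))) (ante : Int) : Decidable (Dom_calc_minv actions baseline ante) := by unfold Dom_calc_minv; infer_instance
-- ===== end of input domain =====

-- B replaces A's interleaved scan over the live result dict by an index-first design
-- (group each player's effective rows, then compute each player's value independently);
-- equivalence is proved on Pre_: inputs where A returns (no raise) and baseline is a valid dict.

-- ===== PORT A =====
-- {x: 0 for x in names}
def pyNamesInit (actions : List (String × String × Int × Int × Int)) : PySem.Dict String Int :=
  actions.foldl (fun d t => d.insert t.1 0) PySem.Dict.empty

-- the body of A's 'for t in actions' loop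
def astep (m : PySem.Dict String Int) (t : String × String × Int × Int × Int) : PySem.Dict String Int :=
  if t.2.2.1 ≠ 0 then
    if t.2.1 = "raise" then
      m.insert t.1 (m.getD t.1 0 + (t.2.2.1 - t.2.2.2.2 - m.getD t.1 0 - 0))
    else if t.2.1 = "bet" then m.insert t.1 (m.getD t.1 0 + t.2.2.1)
    else if t.2.1 = "call" then m.insert t.1 (m.getD t.1 0 + t.2.2.1)
    else m  -- Python raises here; excluded by Pre_
  else m

def calc_minv (actions : List (String × String × Int × Int × Int)) (baseline : Option (List (String × Int))) (ante : Int) : List (String × Int) :=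
  -- A reassigns ante = 0 before any use, so the 'if ante > 0' subtraction never fires
  let minv : PySem.Dict String Int :=
    match baseline with
    | some b => if b.isEmpty then pyNamesInit actions else PySem.Dict.mk b
    | none => pyNamesInit actions
  (actions.foldl astep minv).items

-- ===== PORT B =====
-- groups.setdefault(name, []) then append (action, amt, himark) when amt is truthy
def gstep (g : PySem.Dict String (List (String × Int × Int))) (t : String × String × Int × Int × Int) : PySem.Dict String (List (String × Int × Int)) :=
  let g' := g.setdefault t.1 []
  if t.2.2.1 ≠ 0 then g'.modify t.1 [] (fun l => l ++ [(t.2.1, t.2.2.1, t.2.2.2.2)]) else g'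

def groupRows (actions : List (String × String × Int × Int × Int)) : PySem.Dict String (List (String × Int × Int)) :=
  actions.foldl gstep PySem.Dict.empty

def applyRows (start : Int) (rows : List (String × Int × Int)) : Int :=
  rows.foldl (fun v r =>
    if r.1 = "raise" then r.2.1 - r.2.2
    else if r.1 = "bet" ∨ r.1 = "call" then v + r.2.1
    else v) start  -- Python raises here; excluded by Pre_

def calc_minv_alt (actions : List (String × String × Int × Int × Int)) (baseline : Option (List (String × Int))) (ante : Int) : List (String × Int) :=
  let groups := groupRows actions
  let items : List (String × Int) :=
    match baseline with
    | some b => if b.isEmpty then groups.keys.map (fun k => (k, 0)) else b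
    | none => groups.keys.map (fun k => (k, 0))
  (items.foldl (fun m p => m.insert p.1 (applyRows p.2 (groups.getD p.1 []))) PySem.Dict.empty).items

-- ===== PRECONDITION & SPEC =====
-- Pre_ excludes exactly the inputs where A raises: empty actions (ValueError from zip),
-- ante < 0 (assert), a truthy-amt row whose action is not raise/bet/call (Exception), and a
-- truthy-amt row whose player is missing from a non-empty baseline (KeyError); it also requires
-- baseline's keys to be distinct, since a Python dict cannot carry duplicate keys at all.
def Pre_calc_minv (actions : List (String × String × Int × Int × Int)) (baseline : Option (List (String × Int))) (ante : Int) : Prop :=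
  actions ≠ [] ∧ 0 ≤ ante ∧
  ((baseline.getD []).map Prod.fst).Nodup ∧
  ∀ t ∈ actions, t.2.2.1 ≠ 0 →
    (t.2.1 = "raise" ∨ t.2.1 = "bet" ∨ t.2.1 = "call") ∧
    (baseline.getD [] = [] ∨ t.1 ∈ (baseline.getD []).map Prod.fst)
instance (actions : List (String × String × Int × Int × Int)) (baseline : Option (List (String × Int))) (ante : Int) : Decidable (Pre_calc_minv actions baseline ante) := by unfold Pre_calc_minv; infer_instance

def pvWitness_calc_minv : (List (String × String × Int × Int × Int)) × (Option (List (String × Int))) × Int :=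
  ([("alice", "bet", 2, 0, 0), ("bob", "raise", 6, 0, 2), ("alice", "call", 4, 0, 0)], none, 0)

def Spec_calc_minv (actions : List (String × String × Int × Int × Int)) (baseline : Option (List (String × Int))) (ante : Int) (out : List (String × Int)) : Prop := out = calc_minv_alt actions baseline ante
instance (actions : List (String × String × Int × Int × Int)) (baseline : Option (List (String × Int))) (ante : Int) (out : List (String × Int)) : Decidable (Spec_calc_minv actions baseline ante out) := by unfold Spec_calc_minv; infer_instance

-- ===== CLAIM =====
def Claim_equal_calc_minv : Prop := ∀ (actions : List (String × String × Int × Int × Int)) (baseline : Option (List (String × Int))) (ante : Int), Dom_calc_minv actions baseline ante → Pre_calc_minv actions baseline ante → Spec_calc_minv actions baseline ante (calc_minv actions baseline ante)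

-- ===== LEMMAS AND PROOFS =====

-- the effective rows of player k, in order
def fRows (actions : List (String × String × Int × Int × Int)) (k : String) : List (String × Int × Int) :=
  (actions.filter (fun t => t.1 == k && t.2.2.1 != 0)).map (fun t => (t.2.1, t.2.2.1, t.2.2.2.2))

theorem setdefault_getD_of_ne {κ ν : Type} [BEq κ] [LawfulBEq κ] (d : PySem.Dict κ ν) (k k' : κ) (v d0 : ν) (h : k' ≠ k) :
    (d.setdefault k v).getD k' d0 = d.getD k' d0 := by
  rw [PySem.Dict.getD_eq_get?_getD, PySem.Dict.get?_setdefault_of_ne d v h,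
    ← PySem.Dict.getD_eq_get?_getD]

theorem fRows_cons (t : String × String × Int × Int × Int)
    (rest : List (String × String × Int × Int × Int)) (k : String) :
    fRows (t :: rest) k
    = if t.1 = k ∧ t.2.2.1 ≠ 0 then (t.2.1, t.2.2.1, t.2.2.2.2) :: fRows rest k else fRows rest k := by
  simp only [fRows, List.filter_cons]
  by_cases h1 : t.1 = k <;> by_cases h2 : t.2.2.1 ≠ 0 <;> simp [h1, h2]

theorem gstep_getD (g : PySem.Dict String (List (String × Int × Int)))
    (t : String × String × Int × Int × Int) (k : String) :
    (gstep g t).getD k []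
    = if t.1 = k ∧ t.2.2.1 ≠ 0 then g.getD k [] ++ [(t.2.1, t.2.2.1, t.2.2.2.2)] else g.getD k [] := by
  unfold gstep
  by_cases hk : k = t.1
  · subst hk
    by_cases ha : t.2.2.1 ≠ 0
    · rw [if_pos ha, PySem.Dict.getD_modify_self, PySem.Dict.getD_setdefault_self,
        if_pos ⟨rfl, ha⟩]
    · rw [if_neg ha, PySem.Dict.getD_setdefault_self, if_neg (by tauto)]
  · have hk' : k ≠ t.1 := hk
    by_cases ha : t.2.2.1 ≠ 0
    · rw [if_pos ha, PySem.Dict.getD_modify_of_ne _ _ _ hk',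
        setdefault_getD_of_ne _ _ _ _ _ hk', if_neg (by tauto)]
    · rw [if_neg ha, setdefault_getD_of_ne _ _ _ _ _ hk', if_neg (by tauto)]

theorem groupRows_getD_aux (l : List (String × String × Int × Int × Int))
    (g : PySem.Dict String (List (String × Int × Int))) (k : String) :
    (l.foldl gstep g).getD k [] = g.getD k [] ++ fRows l k := by
  induction l generalizing g with
  | nil => simp [fRows]
  | cons t rest ih =>
    rw [List.foldl_cons, ih, gstep_getD, fRows_cons]
    split <;> simp

theorem groupRows_getD (actions : List (String × String × Int × Int × Int)) (k : String) :
    (groupRows actions).getD k [] = fRows actions k := by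
  rw [groupRows, groupRows_getD_aux]
  simp [PySem.Dict.getD_empty]

theorem gstep_keys (g : PySem.Dict String (List (String × Int × Int)))
    (t : String × String × Int × Int × Int) :
    (gstep g t).keys = if g.contains t.1 = true then g.keys else g.keys ++ [t.1] := by
  unfold gstep
  by_cases hc : g.contains t.1 = true
  · rw [PySem.Dict.setdefault_of_contains _ _ hc, if_pos hc]
    by_cases ha : t.2.2.1 ≠ 0
    · rw [if_pos ha, PySem.Dict.keys_modify, PySem.Dict.keys_insert_of_contains _ _ hc]
    · rw [if_neg ha]
  · have hc' : g.contains t.1 = false := by simpa using hc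
    rw [PySem.Dict.setdefault_of_not_contains _ _ hc', if_neg hc]
    have hkeys := PySem.Dict.keys_insert_of_not_contains g ([] : List (String × Int × Int)) hc'
    by_cases ha : t.2.2.1 ≠ 0
    · rw [if_pos ha, PySem.Dict.keys_modify,
        PySem.Dict.keys_insert_of_contains _ _ (by
          rw [PySem.Dict.contains_eq_decide_mem_keys, hkeys]; simp), hkeys]
    · rw [if_neg ha, hkeys]

theorem groupRows_keys_aux (l : List (String × String × Int × Int × Int))
    (d1 : PySem.Dict String Int) (d2 : PySem.Dict String (List (String × Int × Int)))
    (h : d1.keys = d2.keys) :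
    (l.foldl (fun d t => d.insert t.1 0) d1).keys = (l.foldl gstep d2).keys := by
  induction l generalizing d1 d2 with
  | nil => exact h
  | cons t rest ih =>
    rw [List.foldl_cons, List.foldl_cons]
    apply ih
    show (d1.insert t.1 0).keys = (gstep d2 t).keys
    rw [gstep_keys]
    have hcc : d1.contains t.1 = d2.contains t.1 := by
      rw [PySem.Dict.contains_eq_decide_mem_keys, PySem.Dict.contains_eq_decide_mem_keys, h]
    by_cases hc : d2.contains t.1 = true
    · rw [if_pos hc, PySem.Dict.keys_insert_of_contains _ _ (hcc.trans hc), h]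
    · have hc2 : d2.contains t.1 = false := by simpa using hc
      rw [if_neg hc, PySem.Dict.keys_insert_of_not_contains _ _ (hcc.trans hc2), h]

theorem groupRows_keys (actions : List (String × String × Int × Int × Int)) :
    (groupRows actions).keys = (pyNamesInit actions).keys :=
  (groupRows_keys_aux actions PySem.Dict.empty PySem.Dict.empty rfl).symm

theorem pyNamesInit_getD_aux (l : List (String × String × Int × Int × Int))
    (d : PySem.Dict String Int) (h : ∀ k, d.getD k 0 = 0) (k : String) :
    (l.foldl (fun d t => d.insert t.1 0) d).getD k 0 = 0 := by
  induction l generalizing d with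
  | nil => exact h k
  | cons t rest ih =>
    rw [List.foldl_cons]
    refine ih _ (fun k' => ?_)
    show (d.insert t.1 0).getD k' 0 = 0
    rw [PySem.Dict.getD_insert]
    split <;> simp [h]

theorem pyNamesInit_getD (actions : List (String × String × Int × Int × Int)) (k : String) :
    (pyNamesInit actions).getD k 0 = 0 :=
  pyNamesInit_getD_aux actions PySem.Dict.empty (fun _ => by simp) k

theorem pyNamesInit_nodup (actions : List (String × String × Int × Int × Int)) :
    (pyNamesInit actions).keys.Nodup :=
  PySem.Dict.nodup_keys_foldl_insert_key actions Prod.fst (fun _ _ => 0) PySem.Dict.empty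
    PySem.Dict.nodup_keys_empty

theorem pyNamesInit_contains (actions : List (String × String × Int × Int × Int))
    (t : String × String × Int × Int × Int) (ht : t ∈ actions) :
    (pyNamesInit actions).contains t.1 = true := by
  have hkeys : (pyNamesInit actions).keys
      = PySem.Set.update PySem.Dict.empty.keys (actions.map Prod.fst) :=
    PySem.Dict.keys_foldl_insert_key actions Prod.fst (fun _ _ => (0 : Int)) PySem.Dict.empty
  rw [PySem.Dict.contains_eq_decide_mem_keys, hkeys]
  simp only [decide_eq_true_eq, PySem.Dict.keys_empty, PySem.Set.mem_update]
  exact Or.inr (List.mem_map_of_mem ht)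

theorem applyRows_cons (r : String × Int × Int) (rs : List (String × Int × Int)) (v : Int) :
    applyRows v (r :: rs) = applyRows
      (if r.1 = "raise" then r.2.1 - r.2.2 else if r.1 = "bet" ∨ r.1 = "call" then v + r.2.1 else v) rs := by
  simp [applyRows]

theorem afold_items (actions : List (String × String × Int × Int × Int)) (d : PySem.Dict String Int)
    (hnd : d.keys.Nodup)
    (h : ∀ t ∈ actions, t.2.2.1 ≠ 0 →
      (t.2.1 = "raise" ∨ t.2.1 = "bet" ∨ t.2.1 = "call") ∧ d.contains t.1 = true) :
    (actions.foldl astep d).items = d.items.map (fun p => (p.1, applyRows p.2 (fRows actions p.1))) := by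
  induction actions generalizing d with
  | nil => simp [fRows, applyRows]
  | cons t rest ih =>
    rw [List.foldl_cons]
    by_cases ha : t.2.2.1 ≠ 0
    · obtain ⟨hact, hcont⟩ := h t (List.mem_cons_self) ha
      set w : Int := if t.2.1 = "raise" then t.2.2.1 - t.2.2.2.2 else d.getD t.1 0 + t.2.2.1 with hw
      have hstep : astep d t = d.insert t.1 w := by
        unfold astep
        rcases hact with h1 | h1 | h1
        · rw [if_pos ha, if_pos h1, hw, if_pos h1]
          congr 1
          ring
        · rw [if_pos ha, if_neg (by simp [h1]), if_pos h1, hw, if_neg (by simp [h1])]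
        · rw [if_pos ha, if_neg (by simp [h1]), if_neg (by simp [h1]), if_pos h1, hw,
            if_neg (by simp [h1])]
      rw [hstep]
      have hnd' : (d.insert t.1 w).keys.Nodup := by
        rw [PySem.Dict.keys_insert_of_contains _ _ hcont]; exact hnd
      have hcont' : ∀ s ∈ rest, s.2.2.1 ≠ 0 →
          (s.2.1 = "raise" ∨ s.2.1 = "bet" ∨ s.2.1 = "call") ∧ (d.insert t.1 w).contains s.1 = true := by
        intro s hs hsa
        obtain ⟨h1, h2⟩ := h s (List.mem_cons_of_mem _ hs) hsa
        refine ⟨h1, ?_⟩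
        rw [PySem.Dict.contains_insert]
        simp [h2]
      rw [ih _ hnd' hcont', PySem.Dict.items_insert_of_contains _ _ hcont, List.map_map]
      apply List.map_congr_left
      intro p hp
      by_cases hpk : p.1 = t.1
      · have hget : d.getD t.1 0 = p.2 := by
          rw [← hpk]
          exact PySem.Dict.getD_of_mem_items d (by simpa using hp) hnd 0
        have hfr : fRows (t :: rest) p.1 = (t.2.1, t.2.2.1, t.2.2.2.2) :: fRows rest p.1 := by
          rw [fRows_cons, if_pos ⟨hpk.symm, ha⟩]
        have hbk : (p.1 == t.1) = true := by simp [hpk]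
        have hww : (if t.2.1 = "raise" then t.2.2.1 - t.2.2.2.2
            else if t.2.1 = "bet" ∨ t.2.1 = "call" then p.2 + t.2.2.1 else p.2) = w := by
          rcases hact with h1 | h1 | h1 <;> simp [h1, hw, ← hget]
        simp only [Function.comp_apply, hbk, if_true]
        rw [hfr, applyRows_cons, hww, hpk]
      · have hfr : fRows (t :: rest) p.1 = fRows rest p.1 := by
          rw [fRows_cons, if_neg (by tauto)]
        have hbk : (p.1 == t.1) = false := by simpa using hpk
        simp only [Function.comp_apply, hfr, hbk, Bool.false_eq_true, if_false]
    · have hstep : astep d t = d := by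
        unfold astep
        rw [if_neg ha]
      rw [hstep, ih d hnd (fun s hs => h s (List.mem_cons_of_mem _ hs))]
      apply List.map_congr_left
      intro p _
      have hfr : fRows (t :: rest) p.1 = fRows rest p.1 := by
        rw [fRows_cons, if_neg (by tauto)]
      rw [hfr]

theorem bfold_items (items : List (String × Int)) (v : String × Int → Int)
    (hnd : (items.map Prod.fst).Nodup) :
    (items.foldl (fun m p => m.insert p.1 (v p)) PySem.Dict.empty).items
    = items.map (fun p => (p.1, v p)) := by
  have := PySem.Dict.items_foldl_insert_fresh (l := items) (k := Prod.fst) (v := v)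
    (d := PySem.Dict.empty) (fun a _ => by simp [PySem.Dict.contains_empty]) hnd
  simpa using this

-- ===== VERDICT =====
theorem calc_minv_spec : Claim_equal_calc_minv := by
  intro actions baseline ante _ hpre
  obtain ⟨hne, hante, hndb, hrows⟩ := hpre
  unfold Spec_calc_minv calc_minv calc_minv_alt
  have hdefault :
      (actions.foldl astep (pyNamesInit actions)).items
      = (((groupRows actions).keys.map (fun k => (k, (0 : Int)))).foldl
          (fun m p => m.insert p.1 (applyRows p.2 ((groupRows actions).getD p.1 []))) PySem.Dict.empty).items := by
    rw [afold_items actions (pyNamesInit actions) (pyNamesInit_nodup actions)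
      (fun t ht hta => ⟨(hrows t ht hta).1, pyNamesInit_contains actions t ht⟩)]
    rw [bfold_items _ _ (by
      rw [List.map_map]
      simpa [Function.comp_def, groupRows_keys] using pyNamesInit_nodup actions)]
    rw [PySem.Dict.items_eq_map_keys (pyNamesInit actions) (pyNamesInit_nodup actions) 0,
      List.map_map, groupRows_keys, List.map_map]
    apply List.map_congr_left
    intro k _
    simp [pyNamesInit_getD, groupRows_getD]
  cases baseline with
  | none => exact hdefault
  | some b =>
    by_cases hb : b.isEmpty
    · simp only [hb, if_pos]
      exact hdefault
    · simp only [hb, Bool.false_eq_true, if_false]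
      have hbne : b ≠ [] := by simpa [List.isEmpty_iff] using hb
      have hndb' : (b.map Prod.fst).Nodup := by simpa using hndb
      have hcont : ∀ t ∈ actions, t.2.2.1 ≠ 0 → (PySem.Dict.mk b).contains t.1 = true := by
        intro t ht hta
        rcases (hrows t ht hta).2 with h1 | h1
        · exact absurd (by simpa using h1) hbne
        · rw [PySem.Dict.contains_eq_decide_mem_keys]
          simp only [PySem.Dict.keys] at *
          simpa using h1
      rw [afold_items actions (PySem.Dict.mk b) (by simpa [PySem.Dict.keys] using hndb')
        (fun t ht hta => ⟨(hrows t ht hta).1, hcont t ht hta⟩)]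
      rw [bfold_items _ _ hndb']
      have hitems : (PySem.Dict.mk b).items = b := rfl
      rw [hitems]
      apply List.map_congr_left
      intro p _
      simp [groupRows_getD]
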